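-- pv_equiv track=rewrite | github.com/Sultarazi/IoDFT | iodft/fault.py | _infer_causes_from_pitfalls
-- ===== SOURCE A (Python) =====
-- def _infer_causes_from_pitfalls(pitfalls, component):
--     """Infer possible causes from pitfalls and component."""
--     from iodft.taxonomy import CAUSES
--     pts = set(pitfalls)
--     causes = []
--
--     if component == "hardware":
--         if "nonfunctional" in pts:
--             causes.extend(["battery_depletion", "physical_damage"])
--         if "degradation" in pts:
--             causes.extend(["sensor_ageing", "sensor_degradation"])
--         if "stuck-at" in pts:
--             causes.append("sensor_degradation")
--         if "spike" in pts:
--             causes.append("environmental_exposure")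
--         if "out-of-bound" in pts:
--             causes.append("calibration_drift")
--         if "missing" in pts:
--             causes.append("power_cycling")
--     elif component == "network":
--         if "slow-response-time" in pts:
--             causes.extend(["congestion", "latency"])
--         if "missing" in pts:
--             causes.append("connectivity_loss")
--         if "overwhelmed-traffic" in pts:
--             causes.append("bandwidth_saturation")
--     elif component == "software":
--         if "erroneous" in pts:
--             causes.append("configuration_error")
--         causes.append("firmware_bug")
--
--     # Deduplicate
--     seen = set()
--     unique = []
--     for c in causes:
--         if c not in seen:
--             seen.add(c)
--             unique.append(c)
--     return unique[:4]
-- ===== SOURCE B (Python) =====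
-- # Cause-centric inversion of the rule cascade: each component lists its causes
-- # once, in first-occurrence order, each guarded by the pitfalls that trigger it.
-- # Because every cause appears exactly once, no deduplication pass is needed,
-- # and the scan stops as soon as four causes have fired.
-- _CAUSE_TRIGGERS = {
--     "hardware": [
--         ("battery_depletion", ("nonfunctional",)),
--         ("physical_damage", ("nonfunctional",)),
--         ("sensor_ageing", ("degradation",)),
--         ("sensor_degradation", ("degradation", "stuck-at")),
--         ("environmental_exposure", ("spike",)),
--         ("calibration_drift", ("out-of-bound",)),
--         ("power_cycling", ("missing",)),
--     ],
--     "network": [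
--         ("congestion", ("slow-response-time",)),
--         ("latency", ("slow-response-time",)),
--         ("connectivity_loss", ("missing",)),
--         ("bandwidth_saturation", ("overwhelmed-traffic",)),
--     ],
--     "software": [
--         ("configuration_error", ("erroneous",)),
--         ("firmware_bug", None),
--     ],
-- }
--
--
-- def _infer_causes_from_pitfalls(pitfalls, component):
--     """Infer possible causes from pitfalls and component (cause-centric version)."""
--     pts = set(pitfalls)
--     out = []
--     for cause, triggers in _CAUSE_TRIGGERS.get(component, []):
--         if triggers is None or not pts.isdisjoint(triggers):
--             out.append(cause)
--             if len(out) == 4: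
--                 break
--     return out
-- ===== Notes on version B (the rewrite author's own statement) =====
-- stated objective: alternative
-- what changed: Inverts the rule direction: instead of an if/elif cascade that extends a cause list per pitfall and then deduplicates and truncates, B scans a cause-centric table (each cause listed once with the pitfalls that trigger it) in first-occurrence order, so no dedup pass exists and the scan stops as soon as four causes fire.
import Mathlib
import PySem

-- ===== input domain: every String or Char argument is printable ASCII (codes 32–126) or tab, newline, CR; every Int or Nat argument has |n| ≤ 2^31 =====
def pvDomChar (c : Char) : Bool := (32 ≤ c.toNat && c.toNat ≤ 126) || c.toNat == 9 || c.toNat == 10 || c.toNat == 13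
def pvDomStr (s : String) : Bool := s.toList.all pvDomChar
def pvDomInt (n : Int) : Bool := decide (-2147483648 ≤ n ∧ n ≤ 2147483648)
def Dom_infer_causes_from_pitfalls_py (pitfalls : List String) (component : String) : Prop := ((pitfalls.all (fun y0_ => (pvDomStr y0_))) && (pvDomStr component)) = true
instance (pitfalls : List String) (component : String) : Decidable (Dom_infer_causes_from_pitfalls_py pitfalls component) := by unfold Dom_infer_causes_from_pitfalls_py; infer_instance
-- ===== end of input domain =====

-- B inverts A's pitfall→causes cascade into a cause-centric trigger table scanned once,
-- with no dedup pass and an early stop at four causes (objective: alternative).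

-- ===== PORT A =====
def infer_causes_from_pitfalls_py (pitfalls : List String) (component : String) : List String :=
  let pts : PySem.Set String := PySem.Set.ofList pitfalls
  let causes : List String :=
    if component == "hardware" then
      (if pts.contains "nonfunctional" then ["battery_depletion", "physical_damage"] else []) ++
      (if pts.contains "degradation" then ["sensor_ageing", "sensor_degradation"] else []) ++
      (if pts.contains "stuck-at" then ["sensor_degradation"] else []) ++
      (if pts.contains "spike" then ["environmental_exposure"] else []) ++
      (if pts.contains "out-of-bound" then ["calibration_drift"] else []) ++
      (if pts.contains "missing" then ["power_cycling"] else [])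
    else if component == "network" then
      (if pts.contains "slow-response-time" then ["congestion", "latency"] else []) ++
      (if pts.contains "missing" then ["connectivity_loss"] else []) ++
      (if pts.contains "overwhelmed-traffic" then ["bandwidth_saturation"] else [])
    else if component == "software" then
      (if pts.contains "erroneous" then ["configuration_error"] else []) ++ ["firmware_bug"]
    else []
  -- A's manual dedup loop: seen set + unique list
  let p := causes.foldl
    (fun (st : PySem.Set String × List String) c =>
      if st.1.contains c then st else (st.1.add c, st.2 ++ [c]))
    (PySem.Set.empty, [])
  p.2.take 4

-- ===== PORT B =====
def pvHardwareCauses : List (String × Option (List String)) :=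
  [("battery_depletion", some ["nonfunctional"]),
   ("physical_damage", some ["nonfunctional"]),
   ("sensor_ageing", some ["degradation"]),
   ("sensor_degradation", some ["degradation", "stuck-at"]),
   ("environmental_exposure", some ["spike"]),
   ("calibration_drift", some ["out-of-bound"]),
   ("power_cycling", some ["missing"])]

def pvNetworkCauses : List (String × Option (List String)) :=
  [("congestion", some ["slow-response-time"]),
   ("latency", some ["slow-response-time"]),
   ("connectivity_loss", some ["missing"]),
   ("bandwidth_saturation", some ["overwhelmed-traffic"])]

def pvSoftwareCauses : List (String × Option (List String)) :=
  [("configuration_error", some ["erroneous"]),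
   ("firmware_bug", none)]

def pvCauseTriggers : PySem.Dict String (List (String × Option (List String))) :=
  PySem.Dict.ofList
    [("hardware", pvHardwareCauses), ("network", pvNetworkCauses), ("software", pvSoftwareCauses)]

-- Source B's for-loop with its early 'break' at len(out) == 4, as structural recursion
def pvScan (pts : PySem.Set String) : List (String × Option (List String)) → List String → List String
  | [], out => out
  | (cause, triggers) :: rest, out =>
    let fire := match triggers with
      | none => true
      | some ts => ts.any (fun t => pts.contains t)   -- not pts.isdisjoint(triggers)
    if fire then
      let out' := out ++ [cause]
      if out'.length == 4 then out' else pvScan pts rest out'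
    else pvScan pts rest out

def infer_causes_from_pitfalls_py_alt (pitfalls : List String) (component : String) : List String :=
  let pts : PySem.Set String := PySem.Set.ofList pitfalls
  pvScan pts (pvCauseTriggers.getD component []) []

-- ===== PRECONDITION & SPEC =====
def Spec_infer_causes_from_pitfalls_py (pitfalls : List String) (component : String) (out : List String) : Prop := out = infer_causes_from_pitfalls_py_alt pitfalls component
instance (pitfalls : List String) (component : String) (out : List String) : Decidable (Spec_infer_causes_from_pitfalls_py pitfalls component out) := by unfold Spec_infer_causes_from_pitfalls_py; infer_instance

-- ===== CLAIM (what is proved, stated in full; the proofs are below) =====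
def Claim_equal_infer_causes_from_pitfalls_py : Prop := ∀ (pitfalls : List String) (component : String), Dom_infer_causes_from_pitfalls_py pitfalls component → Spec_infer_causes_from_pitfalls_py pitfalls component (infer_causes_from_pitfalls_py pitfalls component)

-- ===== LEMMAS AND PROOFS =====

set_option maxHeartbeats 2000000 in
theorem infer_causes_from_pitfalls_py_spec : Claim_equal_infer_causes_from_pitfalls_py := by
  unfold Claim_equal_infer_causes_from_pitfalls_py Spec_infer_causes_from_pitfalls_py
  intro pitfalls component _
  unfold infer_causes_from_pitfalls_py infer_causes_from_pitfalls_py_alt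
  by_cases h1 : component = "hardware"
  · subst h1
    rw [show pvCauseTriggers.getD "hardware" [] = pvHardwareCauses from rfl]
    simp only [show (("hardware" : String) == "hardware") = true from rfl, if_true,
      pvHardwareCauses, pvScan, List.any_cons, List.any_nil, Bool.or_false]
    generalize (PySem.Set.ofList pitfalls) = pts
    generalize pts.contains "nonfunctional" = b1
    generalize pts.contains "degradation" = b2
    generalize pts.contains "stuck-at" = b3
    generalize pts.contains "spike" = b4
    generalize pts.contains "out-of-bound" = b5
    generalize pts.contains "missing" = b6
    cases b1 <;> cases b2 <;> cases b3 <;> cases b4 <;> cases b5 <;> cases b6 <;> rfl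
  · by_cases h2 : component = "network"
    · subst h2
      rw [show pvCauseTriggers.getD "network" [] = pvNetworkCauses from rfl]
      simp only [show (("network" : String) == "hardware") = false from rfl,
        show (("network" : String) == "network") = true from rfl,
        if_true, Bool.false_eq_true, if_false, pvNetworkCauses, pvScan, List.any_cons, List.any_nil, Bool.or_false]
      generalize (PySem.Set.ofList pitfalls) = pts
      generalize pts.contains "slow-response-time" = b1
      generalize pts.contains "missing" = b2
      generalize pts.contains "overwhelmed-traffic" = b3
      cases b1 <;> cases b2 <;> cases b3 <;> rfl
    · by_cases h3 : component = "software"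
      · subst h3
        rw [show pvCauseTriggers.getD "software" [] = pvSoftwareCauses from rfl]
        simp only [show (("software" : String) == "hardware") = false from rfl,
          show (("software" : String) == "network") = false from rfl,
          show (("software" : String) == "software") = true from rfl,
          if_true, Bool.false_eq_true, if_false, pvSoftwareCauses, pvScan, List.any_cons, List.any_nil, Bool.or_false]
        generalize (PySem.Set.ofList pitfalls) = pts
        generalize pts.contains "erroneous" = b1
        cases b1 <;> rfl
      · have hk : component ∉ pvCauseTriggers.keys := by
          rw [show pvCauseTriggers.keys = ["hardware", "network", "software"] from rfl]
          simp [h1, h2, h3]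
        have hg : pvCauseTriggers.get? component = none := by
          rw [PySem.Dict.get?_eq_none_iff_not_mem_keys]
          exact hk
        simp [PySem.Dict.getD, hg, h1, h2, h3, pvScan]
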